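-- pv_equiv track=rewrite | github.com/lhydave/AIM-chatbot | src/email_notifier.py | categorize_warnings
-- ===== SOURCE A (Python) =====
-- def categorize_warnings(warnings: list[str]) -> dict[str, list[str]]:
--     """
--     Categorize warnings into different types.
--
--     Args:
--         warnings: list of warning messages
--
--     Returns:
--         dictionary mapping warning categories to lists of warning messages
--     """
--     categories = {
--         "submission_issues": [],
--         "format_issues": [],
--         "problem_id_issues": [],
--         "subproblem_issues": [],
--         "other_issues": [],
--     }
--
--     for warning in warnings:
--         if "duplicate" in warning:
--             categories["submission_issues"].append(warning)
--         elif "No valid source files" in warning: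
--             categories["submission_issues"].append(warning)
--         elif "Multiple source files found" in warning:
--             categories["submission_issues"].append(warning)
--         elif "ill-formatted" in warning.lower():
--             categories["format_issues"].append(warning)
--         elif "between \\begin{{enumerate}} and first \\item in" in warning.lower():
--             categories["format_issues"].append(warning)
--         elif "content after \\end{{enumerate}}" in warning.lower():
--             categories["format_issues"].append(warning)
--         elif "problem id" in warning.lower() and "not found" in warning.lower():
--             categories["problem_id_issues"].append(warning)
--         elif "no problems found" in warning.lower():
--             categories["problem_id_issues"].append(warning)
--         elif "subproblem" in warning.lower():
--             categories["subproblem_issues"].append(warning)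
--         else:
--             categories["other_issues"].append(warning)
--
--     # Check if only submission_issues is non-empty
--     other_categories_empty = all(
--         len(categories[cat]) == 0
--         for cat in ["format_issues", "problem_id_issues", "subproblem_issues", "other_issues"]
--     )
--
--     # it is okay to have submission_issues only since it does not affect the grading
--     if other_categories_empty and categories["submission_issues"]:
--         categories["submission_issues"] = []
--
--     return categories
-- ===== SOURCE B (Python) =====
-- def categorize_warnings(warnings: list[str]) -> dict[str, list[str]]:
--     """Rule-table re-implementation: classify each warning by the first
--     matching rule, then build each bucket with one filter per category."""
--     RULES = [
--         ("submission_issues", lambda w: "duplicate" in w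
--             or "No valid source files" in w
--             or "Multiple source files found" in w),
--         ("format_issues", lambda w: "ill-formatted" in w.lower()
--             or "between \\begin{{enumerate}} and first \\item in" in w.lower()
--             or "content after \\end{{enumerate}}" in w.lower()),
--         ("problem_id_issues", lambda w: ("problem id" in w.lower() and "not found" in w.lower())
--             or "no problems found" in w.lower()),
--         ("subproblem_issues", lambda w: "subproblem" in w.lower()),
--     ]
--
--     def classify(w):
--         for name, pred in RULES:
--             if pred(w):
--                 return name
--         return "other_issues"
--
--     names = ["submission_issues", "format_issues", "problem_id_issues",
--              "subproblem_issues", "other_issues"]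
--     cats = {name: [w for w in warnings if classify(w) == name] for name in names}
--
--     if not any(cats[name] for name in names[1:]):
--         cats["submission_issues"] = []
--     return cats
-- ===== Notes on version B (the rewrite author's own statement) =====
-- stated objective: idiomatic
-- what changed: Replaces the single if/elif loop appending into a dict by a declarative rule table with a first-match classify helper and one filter per category bucket.
import Mathlib
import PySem

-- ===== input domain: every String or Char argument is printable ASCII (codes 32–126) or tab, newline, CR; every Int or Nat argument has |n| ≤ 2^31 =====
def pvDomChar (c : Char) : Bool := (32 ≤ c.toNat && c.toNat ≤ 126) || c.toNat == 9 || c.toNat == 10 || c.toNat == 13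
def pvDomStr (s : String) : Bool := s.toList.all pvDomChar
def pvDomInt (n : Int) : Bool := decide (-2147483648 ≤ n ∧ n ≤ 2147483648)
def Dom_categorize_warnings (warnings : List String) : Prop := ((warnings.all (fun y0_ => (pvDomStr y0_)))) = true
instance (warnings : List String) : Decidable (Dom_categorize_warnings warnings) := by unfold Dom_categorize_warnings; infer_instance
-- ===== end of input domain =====

-- B replaces A's single if/elif loop appending into a dict by a rule table
-- with a first-match classify helper and one filter per category bucket.


-- ===== PORT A =====
-- loop state: the five category lists, in the dict's insertion order
def cwStepA (st : List String × List String × List String × List String × List String)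
    (w : String) : List String × List String × List String × List String × List String :=
  let (sub, fmt, pid, sp, oth) := st
  if PySem.Str.isIn "duplicate" w then (sub ++ [w], fmt, pid, sp, oth)
  else if PySem.Str.isIn "No valid source files" w then (sub ++ [w], fmt, pid, sp, oth)
  else if PySem.Str.isIn "Multiple source files found" w then (sub ++ [w], fmt, pid, sp, oth)
  else if PySem.Str.isIn "ill-formatted" (PySem.Str.lower w) then (sub, fmt ++ [w], pid, sp, oth)
  else if PySem.Str.isIn "between \\begin{{enumerate}} and first \\item in" (PySem.Str.lower w) then (sub, fmt ++ [w], pid, sp, oth)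
  else if PySem.Str.isIn "content after \\end{{enumerate}}" (PySem.Str.lower w) then (sub, fmt ++ [w], pid, sp, oth)
  else if PySem.Str.isIn "problem id" (PySem.Str.lower w) && PySem.Str.isIn "not found" (PySem.Str.lower w) then (sub, fmt, pid ++ [w], sp, oth)
  else if PySem.Str.isIn "no problems found" (PySem.Str.lower w) then (sub, fmt, pid ++ [w], sp, oth)
  else if PySem.Str.isIn "subproblem" (PySem.Str.lower w) then (sub, fmt, pid, sp ++ [w], oth)
  else (sub, fmt, pid, sp, oth ++ [w])

def categorize_warnings (warnings : List String) : List (String × List String) :=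
  let st := warnings.foldl cwStepA ([], [], [], [], [])
  let (sub, fmt, pid, sp, oth) := st
  let otherEmpty := [fmt, pid, sp, oth].all (fun l => l.length == 0)
  let sub := if otherEmpty && !sub.isEmpty then [] else sub
  [("submission_issues", sub), ("format_issues", fmt), ("problem_id_issues", pid),
   ("subproblem_issues", sp), ("other_issues", oth)]

-- ===== PORT B =====
def cwRules : List (String × (String → Bool)) :=
  [("submission_issues", fun w => PySem.Str.isIn "duplicate" w
      || PySem.Str.isIn "No valid source files" w
      || PySem.Str.isIn "Multiple source files found" w),
   ("format_issues", fun w => PySem.Str.isIn "ill-formatted" (PySem.Str.lower w)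
      || PySem.Str.isIn "between \\begin{{enumerate}} and first \\item in" (PySem.Str.lower w)
      || PySem.Str.isIn "content after \\end{{enumerate}}" (PySem.Str.lower w)),
   ("problem_id_issues", fun w => (PySem.Str.isIn "problem id" (PySem.Str.lower w)
        && PySem.Str.isIn "not found" (PySem.Str.lower w))
      || PySem.Str.isIn "no problems found" (PySem.Str.lower w)),
   ("subproblem_issues", fun w => PySem.Str.isIn "subproblem" (PySem.Str.lower w))]

-- the `for name, pred in RULES: if pred(w): return name` loop
def cwFirstMatch : List (String × (String → Bool)) → String → String
  | [], _ => "other_issues"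
  | (name, p) :: rest, w => if p w then name else cwFirstMatch rest w

def cwClassify (w : String) : String := cwFirstMatch cwRules w

def categorize_warnings_alt (warnings : List String) : List (String × List String) :=
  let names := ["submission_issues", "format_issues", "problem_id_issues",
                "subproblem_issues", "other_issues"]
  let cats := names.map (fun name => (name, warnings.filter (fun w => cwClassify w == name)))
  if (cats.drop 1).any (fun p => !p.2.isEmpty) then cats
  else ("submission_issues", []) :: cats.drop 1

-- ===== PRECONDITION & SPEC =====
def Spec_categorize_warnings (warnings : List String) (out : List (String × List String)) : Prop := out = categorize_warnings_alt warnings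
instance (warnings : List String) (out : List (String × List String)) : Decidable (Spec_categorize_warnings warnings out) := by unfold Spec_categorize_warnings; infer_instance

-- ===== CLAIM (what is proved, stated in full; the proofs are below) =====
def Claim_equal_categorize_warnings : Prop := ∀ (warnings : List String), Dom_categorize_warnings warnings → Spec_categorize_warnings warnings (categorize_warnings warnings)

-- ===== LEMMAS AND PROOFS =====

-- A's loop step, expressed through B's classifier
set_option maxHeartbeats 2000000 in
lemma cwStepA_classify (st : List String × List String × List String × List String × List String)
    (w : String) :
    cwStepA st w =
      (let (sub, fmt, pid, sp, oth) := st
       if cwClassify w == "submission_issues" then (sub ++ [w], fmt, pid, sp, oth)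
       else if cwClassify w == "format_issues" then (sub, fmt ++ [w], pid, sp, oth)
       else if cwClassify w == "problem_id_issues" then (sub, fmt, pid ++ [w], sp, oth)
       else if cwClassify w == "subproblem_issues" then (sub, fmt, pid, sp ++ [w], oth)
       else (sub, fmt, pid, sp, oth ++ [w])) := by
  obtain ⟨sub, fmt, pid, sp, oth⟩ := st
  simp only [cwStepA, cwClassify, cwRules, cwFirstMatch]
  split_ifs <;> simp_all

lemma cwClassify_cases (w : String) :
    cwClassify w = "submission_issues" ∨ cwClassify w = "format_issues" ∨
    cwClassify w = "problem_id_issues" ∨ cwClassify w = "subproblem_issues" ∨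
    cwClassify w = "other_issues" := by
  simp only [cwClassify, cwRules, cwFirstMatch]
  split_ifs <;> simp

-- the fold accumulates exactly the classify-filters
lemma cw_fold_eq (ws : List String) (sub fmt pid sp oth : List String) :
    ws.foldl cwStepA (sub, fmt, pid, sp, oth) =
      (sub ++ ws.filter (fun w => cwClassify w == "submission_issues"),
       fmt ++ ws.filter (fun w => cwClassify w == "format_issues"),
       pid ++ ws.filter (fun w => cwClassify w == "problem_id_issues"),
       sp ++ ws.filter (fun w => cwClassify w == "subproblem_issues"),
       oth ++ ws.filter (fun w => cwClassify w == "other_issues")) := by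
  induction ws generalizing sub fmt pid sp oth with
  | nil => simp
  | cons w ws ih =>
    rw [List.foldl_cons, cwStepA_classify]
    simp only []
    rcases cwClassify_cases w with h | h | h | h | h <;>
      · rw [ih]
        simp_all

-- ===== VERDICT (by name: the statement is the Claim_ definition above) =====
theorem categorize_warnings_spec : Claim_equal_categorize_warnings := by
  intro warnings _
  show _ = _
  unfold categorize_warnings categorize_warnings_alt
  rw [cw_fold_eq]
  simp only [List.nil_append, List.map, List.drop, List.any_cons, List.any_nil, List.all_cons,
    List.all_nil, Bool.and_true]
  split_ifs with h1 h2 h3 <;> simp_all [List.length_eq_zero_iff]
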